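-- pv_equiv track=rewrite | github.com/Parthita/stem-cli | stem/tui.py | _build_filtered_nodes
-- ===== SOURCE A (Python) =====
-- from typing import Dict, List, Optional, Tuple
--
-- def _build_filtered_nodes(nodes: Dict[str, dict], query: str) -> Dict[str, dict]:
--     if not query:
--         return nodes
--     query_lower = query.lower()
--     included = set()
--
--     def include_ancestors(node_id: str) -> None:
--         current = node_id
--         while current:
--             if current in included:
--                 break
--             included.add(current)
--             parent = nodes[current].get("parent")
--             current = parent if parent in nodes else None
--
--     for node_id, node_data in nodes.items():
--         prompt = node_data.get("prompt", "")
--         if query_lower in node_id.lower() or query_lower in prompt.lower():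
--             include_ancestors(node_id)
--
--     return {node_id: nodes[node_id] for node_id in nodes if node_id in included}
-- ===== SOURCE B (Python) =====
-- def _build_filtered_nodes(nodes, query):
--     if not query:
--         return nodes
--     q = query.lower()
--     included = {nid for nid, nd in nodes.items()
--                 if q in nid.lower() or q in nd.get("prompt", "").lower()}
--     # naive fixpoint: repeated whole-dict passes adding parents of already-included
--     # nodes until a pass changes nothing (no walks, no stack)
--     changed = True
--     while changed:
--         changed = False
--         for nid in nodes:
--             if nid in included:
--                 parent = nodes[nid].get("parent")
--                 if parent and parent in nodes and parent not in included:
--                     included.add(parent)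
--                     changed = True
--     return {nid: nodes[nid] for nid in nodes if nid in included}
-- ===== Notes on version B (the rewrite author's own statement) =====
-- stated objective: alternative
-- what changed: A chases the parent-pointer chain upward from every matching node with a visited-set walk; B never walks a chain: it seeds the matching ids and then runs naive fixpoint iteration, repeating whole-dict passes that add the parent of any already-included node until a full pass changes nothing.
-- intended difference: On dicts containing an empty-string node id whose prompt matches the query, A silently drops that node (its falsy-string 'while current' guard never runs), while B includes it like any other matching node, which is the intended behaviour. — e.g. on _build_filtered_nodes([("", [("prompt", "a")])], "a"): A returns [], B returns [("", [("prompt", "a")])]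
import Mathlib
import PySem

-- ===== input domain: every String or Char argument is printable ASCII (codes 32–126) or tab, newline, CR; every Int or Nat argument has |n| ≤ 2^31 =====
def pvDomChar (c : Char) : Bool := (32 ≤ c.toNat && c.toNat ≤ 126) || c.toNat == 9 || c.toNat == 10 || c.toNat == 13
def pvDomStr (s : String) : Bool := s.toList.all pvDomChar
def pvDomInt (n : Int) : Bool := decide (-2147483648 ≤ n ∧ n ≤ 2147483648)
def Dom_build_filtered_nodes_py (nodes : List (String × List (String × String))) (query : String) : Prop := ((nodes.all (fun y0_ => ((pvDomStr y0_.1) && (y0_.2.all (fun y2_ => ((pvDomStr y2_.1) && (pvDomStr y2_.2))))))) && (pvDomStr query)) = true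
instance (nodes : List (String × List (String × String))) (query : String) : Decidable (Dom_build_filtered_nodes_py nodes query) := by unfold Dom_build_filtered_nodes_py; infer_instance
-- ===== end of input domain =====

-- A filters a node dict to the nodes whose id or prompt contains the query (case-insensitive)
-- plus all their ancestors, chasing the parent chain upward from every match with a visited set.
-- B never walks a chain: it seeds the matching ids and runs naive fixpoint iteration — repeated
-- whole-dict passes adding the parent of any already-included node until a pass changes nothing.
-- Same return value except the stated D_ corner (empty-string node id matched via its prompt).

-- ===== PORT A =====
-- include_ancestors: the 'while current:' walk; fuel 2*len+3 is proven sufficient (the loop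
-- adds a new key each step or stops), so the fuel guard never fires on any input.
def pvWalkA (nodes : List (String × List (String × String))) : Nat → String → List String → List String
  | 0, _, included => included
  | fuel+1, current, included =>
    if current = "" then included                    -- 'while current:' — empty string is falsy
    else if included.contains current then included  -- 'if current in included: break'
    else
      let included' := PySem.Set.add included current
      match ((nodes.lookup current).getD []).lookup "parent" with
      | some p => if (nodes.lookup p).isSome then pvWalkA nodes fuel p included'
                  else included'                     -- current = None; loop exits
      | none => included'

def build_filtered_nodes_py (nodes : List (String × List (String × String))) (query : String) : List (String × List (String × String)) :=
  if query = "" then nodes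
  else
    let ql := PySem.Str.lower query
    let included := nodes.foldl (fun inc p =>
      if PySem.Str.isIn ql (PySem.Str.lower p.1)
         || PySem.Str.isIn ql (PySem.Str.lower ((p.2.lookup "prompt").getD "")) then
        pvWalkA nodes (2 * nodes.length + 3) p.1 inc
      else inc) ([] : List String)
    -- {node_id: nodes[node_id] for node_id in nodes if node_id in included}
    (nodes.filter (fun p => included.contains p.1)).map (fun p => (p.1, (nodes.lookup p.1).getD []))

-- ===== PORT B =====
-- the seed: {nid for nid, nd in nodes.items() if q in nid.lower() or q in nd.get("prompt","").lower()}
def pvMatches (q : String) (nodes : List (String × List (String × String))) : List String :=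
  (nodes.filter (fun p => PySem.Str.isIn q (PySem.Str.lower p.1)
      || PySem.Str.isIn q (PySem.Str.lower ((p.2.lookup "prompt").getD "")))).map Prod.fst

-- one step of the inner 'for nid in nodes:' scan; state = (included, changed)
def pvRoundF (nodes : List (String × List (String × String))) (st : List String × Bool) (p : String × List (String × String)) : List String × Bool :=
  if st.1.contains p.1 then
    match ((nodes.lookup p.1).getD []).lookup "parent" with
    | some par =>
      if par ≠ "" && (nodes.lookup par).isSome && !st.1.contains par then
        (PySem.Set.add st.1 par, true)
      else st
    | none => st
  else st

-- one full pass over the dict: 'changed = False; for nid in nodes: ...'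
def pvRound (nodes : List (String × List (String × String))) (I : List String) : List String × Bool :=
  nodes.foldl (pvRoundF nodes) (I, false)

-- 'while changed:' — each changed pass adds at least one new key, so fuel len+1 is proven
-- sufficient and the fuel guard never fires on any input.
def pvFix (nodes : List (String × List (String × String))) : Nat → List String → List String
  | 0, I => I
  | fuel+1, I =>
    let r := pvRound nodes I
    if r.2 then pvFix nodes fuel r.1 else r.1

def build_filtered_nodes_py_alt (nodes : List (String × List (String × String))) (query : String) : List (String × List (String × String)) :=
  if query = "" then nodes
  else
    let q := PySem.Str.lower query
    let included := pvFix nodes (nodes.length + 1) (PySem.Set.ofList (pvMatches q nodes))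
    -- {nid: nodes[nid] for nid in nodes if nid in included}
    (nodes.filter (fun p => included.contains p.1)).map (fun p => (p.1, (nodes.lookup p.1).getD []))

-- ===== PRECONDITION & SPEC =====
-- On dicts containing an empty-string node id whose prompt matches the query, A silently drops
-- that node (its falsy-string 'while current' guard never runs), while B includes it like any
-- other matching node, which is the intended behaviour.
def D_build_filtered_nodes_py (nodes : List (String × List (String × String))) (query : String) : Prop :=
  query ≠ "" ∧ ∃ p ∈ nodes, p.1 = "" ∧
    PySem.Str.isIn (PySem.Str.lower query) (PySem.Str.lower ((p.2.lookup "prompt").getD "")) = true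
instance (nodes : List (String × List (String × String))) (query : String) : Decidable (D_build_filtered_nodes_py nodes query) := by unfold D_build_filtered_nodes_py; infer_instance

def Spec_build_filtered_nodes_py (nodes : List (String × List (String × String))) (query : String) (out : List (String × List (String × String))) : Prop := ¬ D_build_filtered_nodes_py nodes query → out = build_filtered_nodes_py_alt nodes query
instance (nodes : List (String × List (String × String))) (query : String) (out : List (String × List (String × String))) : Decidable (Spec_build_filtered_nodes_py nodes query out) := by unfold Spec_build_filtered_nodes_py; infer_instance

def pvDiffWitness_build_filtered_nodes_py : (List (String × List (String × String))) × String :=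
  ([("", [("prompt", "a")])], "a")
def pvDiffWitnessOut_build_filtered_nodes_py : (List (String × List (String × String))) × (List (String × List (String × String))) :=
  ([], [("", [("prompt", "a")])])

-- ===== CLAIM (what is proved, stated in full; the proofs are below) =====
def Claim_unchanged_build_filtered_nodes_py : Prop := ∀ (nodes : List (String × List (String × String))) (query : String), Dom_build_filtered_nodes_py nodes query → Spec_build_filtered_nodes_py nodes query (build_filtered_nodes_py nodes query)
def Claim_changed_build_filtered_nodes_py : Prop := Dom_build_filtered_nodes_py (pvDiffWitness_build_filtered_nodes_py.1) (pvDiffWitness_build_filtered_nodes_py.2) ∧ D_build_filtered_nodes_py (pvDiffWitness_build_filtered_nodes_py.1) (pvDiffWitness_build_filtered_nodes_py.2) ∧ build_filtered_nodes_py (pvDiffWitness_build_filtered_nodes_py.1) (pvDiffWitness_build_filtered_nodes_py.2) = pvDiffWitnessOut_build_filtered_nodes_py.1 ∧ build_filtered_nodes_py_alt (pvDiffWitness_build_filtered_nodes_py.1) (pvDiffWitness_build_filtered_nodes_py.2) = pvDiffWitnessOut_build_filtered_nodes_py.2 ∧ pvDiffWitnessOut_build_filtered_nodes_py.1 ≠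 pvDiffWitnessOut_build_filtered_nodes_py.2
def Claim_exact_build_filtered_nodes_py : Prop := ∀ (nodes : List (String × List (String × String))) (query : String), Dom_build_filtered_nodes_py nodes query → D_build_filtered_nodes_py nodes query → build_filtered_nodes_py nodes query ≠ build_filtered_nodes_py_alt nodes query

-- ===== LEMMAS AND PROOFS =====

-- one parent step: u's parent is v, v is a key and not the empty string
def pvStep (nodes : List (String × List (String × String))) (u v : String) : Prop :=
  ((nodes.lookup u).getD []).lookup "parent" = some v ∧ (nodes.lookup v).isSome = true ∧ v ≠ ""

def pvReach (nodes : List (String × List (String × String))) : String → String → Prop :=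
  Relation.ReflTransGen (pvStep nodes)

-- number of keys not yet included (the fuel measure)
def pvNewK (nodes : List (String × List (String × String))) (I : List String) : Nat :=
  ((nodes.map Prod.fst).filter (fun k => !I.contains k)).length

-- the match test as a Prop on an items entry
def pvTest (q : String) (p : String × List (String × String)) : Prop :=
  (PySem.Str.isIn q (PySem.Str.lower p.1)
    || PySem.Str.isIn q (PySem.Str.lower ((p.2.lookup "prompt").getD ""))) = true

lemma pvNewK_le (nodes : List (String × List (String × String))) (I : List String) :
    pvNewK nodes I ≤ nodes.length := by
  calc pvNewK nodes I ≤ (nodes.map Prod.fst).length := List.length_filter_le _ _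
    _ = nodes.length := List.length_map ..

theorem pvFilterMono (l : List String) (p q : String → Bool) (h : ∀ x, q x = true → p x = true) :
    (l.filter q).length ≤ (l.filter p).length :=
  List.Sublist.length_le (List.monotone_filter_right l h)

theorem pvFilterLt (l : List String) (p q : String → Bool) (h : ∀ x, q x = true → p x = true)
    (c : String) (hc : c ∈ l) (hp : p c = true) (hq : q c = false) :
    (l.filter q).length < (l.filter p).length := by
  have hsub : List.Sublist (l.filter q) (l.filter p) := List.monotone_filter_right l h
  rcases Nat.lt_or_ge (l.filter q).length (l.filter p).length with h1 | h1
  · exact h1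
  · exfalso
    have heq : l.filter q = l.filter p := hsub.eq_of_length (Nat.le_antisymm (hsub.length_le) h1)
    have hm : c ∈ l.filter p := List.mem_filter.mpr ⟨hc, hp⟩
    rw [← heq] at hm
    have := (List.mem_filter.mp hm).2
    rw [hq] at this; exact Bool.false_ne_true this

theorem pvNewK_mono (nodes : List (String × List (String × String))) {I I' : List String}
    (h : ∀ x, x ∈ I → x ∈ I') : pvNewK nodes I' ≤ pvNewK nodes I := by
  apply pvFilterMono
  intro x hx
  simp only [Bool.not_eq_true', ← Bool.not_eq_true, List.contains_eq_mem, decide_eq_true_eq] at *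
  exact fun hm => hx (h x hm)

theorem pvNewK_add_lt (nodes : List (String × List (String × String))) {I : List String} {c : String}
    (hc : c ∈ nodes.map Prod.fst) (hnotin : c ∉ I) :
    pvNewK nodes (PySem.Set.add I c) < pvNewK nodes I := by
  apply pvFilterLt _ _ _ _ c hc
  · simp [List.contains_eq_mem, hnotin]
  · simp [List.contains_eq_mem, PySem.Set.mem_add]
  · intro x hx
    simp only [Bool.not_eq_true', ← Bool.not_eq_true, List.contains_eq_mem, decide_eq_true_eq, PySem.Set.mem_add] at *
    tauto

theorem pvLookup_isSome_mem {nodes : List (String × List (String × String))} {c : String}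
    (h : (nodes.lookup c).isSome = true) : c ∈ nodes.map Prod.fst := by
  induction nodes with
  | nil => simp [List.lookup] at h
  | cons hd tl ih =>
    obtain ⟨k, v⟩ := hd
    rw [List.lookup_cons] at h
    cases hck : (c == k)
    · rw [hck] at h; simp [ih h]
    · simp at hck; simp [hck]

theorem pvStep_mem {nodes : List (String × List (String × String))} {u v : String}
    (h : pvStep nodes u v) : u ∈ nodes.map Prod.fst := by
  apply pvLookup_isSome_mem
  cases hl : nodes.lookup u with
  | none =>
    exfalso
    have h1 := h.1
    rw [hl] at h1
    simp at h1
  | some _ => simp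

theorem pvClosed_reach {nodes : List (String × List (String × String))} {I : List String}
    (hcl : ∀ u ∈ I, ∀ v, pvStep nodes u v → v ∈ I) {c y : String}
    (hc : c ∈ I) (h : pvReach nodes c y) : y ∈ I := by
  induction h with
  | refl => exact hc
  | tail _ hstep ih => exact hcl _ ih _ hstep

-- ---------- A-side lemmas (visited-set walk) ----------

theorem pvWalkA_spec (nodes : List (String × List (String × String))) :
    ∀ (fuel : Nat) (c : String) (I : List String), c ≠ "" →
    (∀ u ∈ I, ∀ v, pvStep nodes u v → v ∈ I ∨ v = c) →
    2 * pvNewK nodes I + (if c ∈ I then 0 else 1) + (if c ∈ nodes.map Prod.fst then 0 else 1) < fuel →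
    (∀ y, y ∈ pvWalkA nodes fuel c I ↔ y ∈ I ∨ pvReach nodes c y) ∧
    (∀ u ∈ pvWalkA nodes fuel c I, ∀ v, pvStep nodes u v → v ∈ pvWalkA nodes fuel c I) := by
  intro fuel
  induction fuel with
  | zero => intro c I _ _ hfuel; omega
  | succ fuel ih =>
    intro c I hc hJ hfuel
    by_cases hmem : c ∈ I
    · have hres : pvWalkA nodes (fuel+1) c I = I := by
        simp only [pvWalkA, if_neg hc]
        rw [if_pos (by simpa [List.contains_eq_mem] using hmem)]
      rw [hres]
      have hclosed : ∀ u ∈ I, ∀ v, pvStep nodes u v → v ∈ I := by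
        intro u hu v hs
        rcases hJ u hu v hs with h | rfl
        · exact h
        · exact hmem
      refine ⟨fun y => ⟨fun h => Or.inl h, fun h => ?_⟩, hclosed⟩
      rcases h with h | h
      · exact h
      · exact pvClosed_reach hclosed hmem h
    · have hcont : I.contains c = false := by simpa [List.contains_eq_mem] using hmem
      have hmemI' : ∀ y, y ∈ PySem.Set.add I c ↔ y ∈ I ∨ y = c := fun y => PySem.Set.mem_add ..
      cases hpar : ((nodes.lookup c).getD []).lookup "parent" with
      | none =>
        have hres : pvWalkA nodes (fuel+1) c I = PySem.Set.add I c := by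
          simp only [pvWalkA, if_neg hc, hcont, Bool.false_eq_true, if_false, hpar]
        rw [hres]
        have hnostep : ∀ v, ¬ pvStep nodes c v := by
          intro v hs; rw [hs.1] at hpar; exact Option.some_ne_none v hpar
        constructor
        · intro y
          rw [hmemI']
          constructor
          · rintro (h | rfl)
            · exact Or.inl h
            · exact Or.inr Relation.ReflTransGen.refl
          · rintro (h | h)
            · exact Or.inl h
            · rcases Relation.ReflTransGen.cases_head h with rfl | ⟨v, hv, _⟩
              · exact Or.inr rfl
              · exact absurd hv (hnostep v)
        · intro u hu v hs
          rcases (hmemI' u).mp hu with h | rfl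
          · rcases hJ u h v hs with h' | rfl
            · exact (hmemI' v).mpr (Or.inl h')
            · exact (hmemI' v).mpr (Or.inr rfl)
          · exact absurd hs (hnostep v)
      | some p =>
        have hres : pvWalkA nodes (fuel+1) c I =
            (if (nodes.lookup p).isSome then pvWalkA nodes fuel p (PySem.Set.add I c)
             else PySem.Set.add I c) := by
          simp only [pvWalkA, if_neg hc, hcont, Bool.false_eq_true, if_false, hpar]
        rw [hres]
        have hstep_uniq : ∀ v, pvStep nodes c v → v = p := by
          intro v hs
          have := hs.1; rw [hpar] at this; exact (Option.some.inj this).symm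
        cases hps : (nodes.lookup p).isSome with
        | false =>
          rw [if_neg (by simp)]
          have hnostep : ∀ v, ¬ pvStep nodes c v := by
            intro v hs
            have hv := hstep_uniq v hs; subst hv
            rw [hs.2.1] at hps; exact Bool.noConfusion hps
          constructor
          · intro y
            rw [hmemI']
            constructor
            · rintro (h | rfl)
              · exact Or.inl h
              · exact Or.inr Relation.ReflTransGen.refl
            · rintro (h | h)
              · exact Or.inl h
              · rcases Relation.ReflTransGen.cases_head h with rfl | ⟨v, hv, _⟩
                · exact Or.inr rfl
                · exact absurd hv (hnostep v)
          · intro u hu v hs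
            rcases (hmemI' u).mp hu with h | rfl
            · rcases hJ u h v hs with h' | rfl
              · exact (hmemI' v).mpr (Or.inl h')
              · exact (hmemI' v).mpr (Or.inr rfl)
            · exact absurd hs (hnostep v)
        | true =>
          rw [if_pos rfl]
          by_cases hp0 : p = ""
          · subst hp0
            have hres2 : pvWalkA nodes fuel "" (PySem.Set.add I c) = PySem.Set.add I c := by
              cases fuel <;> simp [pvWalkA]
            rw [hres2]
            have hnostep : ∀ v, ¬ pvStep nodes c v := by
              intro v hs
              have hv := hstep_uniq v hs; subst hv
              exact hs.2.2 rfl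
            constructor
            · intro y
              rw [hmemI']
              constructor
              · rintro (h | rfl)
                · exact Or.inl h
                · exact Or.inr Relation.ReflTransGen.refl
              · rintro (h | h)
                · exact Or.inl h
                · rcases Relation.ReflTransGen.cases_head h with rfl | ⟨v, hv, _⟩
                  · exact Or.inr rfl
                  · exact absurd hv (hnostep v)
            · intro u hu v hs
              rcases (hmemI' u).mp hu with h | rfl
              · rcases hJ u h v hs with h' | rfl
                · exact (hmemI' v).mpr (Or.inl h')
                · exact (hmemI' v).mpr (Or.inr rfl)
              · exact absurd hs (hnostep v)
          · -- real recursive case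
            have hstepcp : pvStep nodes c p := ⟨hpar, hps, hp0⟩
            have hpkeys : p ∈ nodes.map Prod.fst := pvLookup_isSome_mem hps
            have hJ' : ∀ u ∈ PySem.Set.add I c, ∀ v, pvStep nodes u v → v ∈ PySem.Set.add I c ∨ v = p := by
              intro u hu v hs
              rcases (hmemI' u).mp hu with h | rfl
              · rcases hJ u h v hs with h' | rfl
                · exact Or.inl ((hmemI' v).mpr (Or.inl h'))
                · exact Or.inl ((hmemI' v).mpr (Or.inr rfl))
              · exact Or.inr (hstep_uniq v hs)
            have hfuel' : 2 * pvNewK nodes (PySem.Set.add I c) +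
                (if p ∈ PySem.Set.add I c then 0 else 1) +
                (if p ∈ nodes.map Prod.fst then 0 else 1) < fuel := by
              rw [if_pos hpkeys]
              have hmono : pvNewK nodes (PySem.Set.add I c) ≤ pvNewK nodes I :=
                pvNewK_mono nodes (fun x hx => (hmemI' x).mpr (Or.inl hx))
              rw [if_neg hmem] at hfuel
              by_cases hck : c ∈ nodes.map Prod.fst
              · have := pvNewK_add_lt nodes hck hmem
                rw [if_pos hck] at hfuel
                split <;> omega
              · rw [if_neg hck] at hfuel
                split <;> omega
            obtain ⟨ihmem, ihcl⟩ := ih p (PySem.Set.add I c) hp0 hJ' hfuel'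
            refine ⟨fun y => ?_, ihcl⟩
            rw [ihmem y, hmemI']
            constructor
            · rintro ((h | rfl) | h)
              · exact Or.inl h
              · exact Or.inr Relation.ReflTransGen.refl
              · exact Or.inr (Relation.ReflTransGen.head hstepcp h)
            · rintro (h | h)
              · exact Or.inl (Or.inl h)
              · rcases Relation.ReflTransGen.cases_head h with rfl | ⟨v, hv, hr⟩
                · exact Or.inl (Or.inr rfl)
                · have := hstep_uniq v hv; subst this
                  exact Or.inr hr

-- walkA never adds the empty string
theorem pvWalkA_no_empty (nodes : List (String × List (String × String))) :
    ∀ (fuel : Nat) (c : String) (I : List String), "" ∉ I → "" ∉ pvWalkA nodes fuel c I := by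
  intro fuel
  induction fuel with
  | zero => intro c I h; simpa [pvWalkA] using h
  | succ fuel ih =>
    intro c I h
    by_cases hc : c = ""
    · simpa [pvWalkA, hc] using h
    · have hadd : "" ∉ PySem.Set.add I c := by
        rw [PySem.Set.mem_add]
        rintro (h1 | h1)
        · exact h h1
        · exact hc h1.symm
      by_cases hm : I.contains c = true
      · have : pvWalkA nodes (fuel+1) c I = I := by
          simp only [pvWalkA, if_neg hc, hm, if_true]
        rw [this]; exact h
      · have hm' : I.contains c = false := by simpa using hm
        cases hpar : ((nodes.lookup c).getD []).lookup "parent" with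
        | none =>
          have : pvWalkA nodes (fuel+1) c I = PySem.Set.add I c := by
            simp only [pvWalkA, if_neg hc, hm', Bool.false_eq_true, if_false, hpar]
          rw [this]; exact hadd
        | some p =>
          have hres : pvWalkA nodes (fuel+1) c I =
              (if (nodes.lookup p).isSome then pvWalkA nodes fuel p (PySem.Set.add I c)
               else PySem.Set.add I c) := by
            simp only [pvWalkA, if_neg hc, hm', Bool.false_eq_true, if_false, hpar]
          rw [hres]
          by_cases hps : (nodes.lookup p).isSome = true
          · rw [if_pos hps]; exact ih p _ hadd
          · rw [if_neg hps]; exact hadd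

-- A's scan: membership of the folded included set, and the set stays closed
theorem pvFoldA_spec (nodes : List (String × List (String × String))) (ql : String) :
    ∀ (l : List (String × List (String × String))) (I : List String),
    (∀ p ∈ l, pvTest ql p → p.1 ≠ "") →
    (∀ u ∈ I, ∀ v, pvStep nodes u v → v ∈ I) →
    (∀ y, y ∈ l.foldl (fun inc p =>
        if PySem.Str.isIn ql (PySem.Str.lower p.1)
           || PySem.Str.isIn ql (PySem.Str.lower ((p.2.lookup "prompt").getD "")) then
          pvWalkA nodes (2 * nodes.length + 3) p.1 inc
        else inc) I ↔ y ∈ I ∨ ∃ p ∈ l, pvTest ql p ∧ pvReach nodes p.1 y) ∧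
    (∀ u ∈ l.foldl (fun inc p =>
        if PySem.Str.isIn ql (PySem.Str.lower p.1)
           || PySem.Str.isIn ql (PySem.Str.lower ((p.2.lookup "prompt").getD "")) then
          pvWalkA nodes (2 * nodes.length + 3) p.1 inc
        else inc) I, ∀ v, pvStep nodes u v → v ∈ l.foldl (fun inc p =>
        if PySem.Str.isIn ql (PySem.Str.lower p.1)
           || PySem.Str.isIn ql (PySem.Str.lower ((p.2.lookup "prompt").getD "")) then
          pvWalkA nodes (2 * nodes.length + 3) p.1 inc
        else inc) I) := by
  intro l
  induction l with
  | nil =>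
    intro I _ hcl
    refine ⟨fun y => ?_, by simpa [List.foldl_nil] using hcl⟩
    simp [List.foldl_nil]
  | cons p l ih =>
    intro I hne hcl
    rw [List.foldl_cons]
    by_cases ht : (PySem.Str.isIn ql (PySem.Str.lower p.1)
        || PySem.Str.isIn ql (PySem.Str.lower ((p.2.lookup "prompt").getD ""))) = true
    · rw [if_pos ht]
      have hp1 : p.1 ≠ "" := hne p (List.mem_cons_self ..) ht
      have hfuel : 2 * pvNewK nodes I + (if p.1 ∈ I then 0 else 1)
          + (if p.1 ∈ nodes.map Prod.fst then 0 else 1) < 2 * nodes.length + 3 := by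
        have h1 := pvNewK_le nodes I
        have h2 : (if p.1 ∈ I then 0 else 1) ≤ 1 := by split <;> omega
        have h3 : (if p.1 ∈ nodes.map Prod.fst then 0 else 1) ≤ 1 := by split <;> omega
        omega
      obtain ⟨hmemW, hclW⟩ := pvWalkA_spec nodes (2 * nodes.length + 3) p.1 I hp1
        (fun u hu v hs => Or.inl (hcl u hu v hs)) hfuel
      obtain ⟨hmemF, hclF⟩ := ih (pvWalkA nodes (2 * nodes.length + 3) p.1 I)
        (fun q hq hTq => hne q (List.mem_cons_of_mem _ hq) hTq) hclW
      refine ⟨fun y => ?_, hclF⟩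
      rw [hmemF y]
      constructor
      · rintro (hw | ⟨q, hq, hTq, hRq⟩)
        · rcases (hmemW y).mp hw with h | h
          · exact Or.inl h
          · exact Or.inr ⟨p, List.mem_cons_self .., ht, h⟩
        · exact Or.inr ⟨q, List.mem_cons_of_mem _ hq, hTq, hRq⟩
      · rintro (h | ⟨q, hq, hTq, hRq⟩)
        · exact Or.inl ((hmemW y).mpr (Or.inl h))
        · rcases List.mem_cons.mp hq with rfl | hq'
          · exact Or.inl ((hmemW y).mpr (Or.inr hRq))
          · exact Or.inr ⟨q, hq', hTq, hRq⟩
    · rw [if_neg ht]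
      obtain ⟨hmemF, hclF⟩ := ih I (fun q hq hTq => hne q (List.mem_cons_of_mem _ hq) hTq) hcl
      refine ⟨fun y => ?_, hclF⟩
      rw [hmemF y]
      constructor
      · rintro (h | ⟨q, hq, hTq, hRq⟩)
        · exact Or.inl h
        · exact Or.inr ⟨q, List.mem_cons_of_mem _ hq, hTq, hRq⟩
      · rintro (h | ⟨q, hq, hTq, hRq⟩)
        · exact Or.inl h
        · rcases List.mem_cons.mp hq with rfl | hq'
          · exact absurd hTq ht
          · exact Or.inr ⟨q, hq', hTq, hRq⟩

theorem pvFoldA_no_empty (nodes : List (String × List (String × String))) (ql : String)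
    (l : List (String × List (String × String))) (I : List String) (h : "" ∉ I) :
    "" ∉ l.foldl (fun inc p =>
        if PySem.Str.isIn ql (PySem.Str.lower p.1)
           || PySem.Str.isIn ql (PySem.Str.lower ((p.2.lookup "prompt").getD "")) then
          pvWalkA nodes (2 * nodes.length + 3) p.1 inc
        else inc) I := by
  induction l generalizing I with
  | nil => simpa using h
  | cons p l ih =>
    rw [List.foldl_cons]
    split
    · exact ih _ (pvWalkA_no_empty nodes _ _ _ h)
    · exact ih _ h

-- ---------- B-side lemmas (round-based fixpoint) ----------

-- each scan step either leaves the state alone or adds one new parent and raises the flag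
theorem pvRoundF_cases (nodes : List (String × List (String × String)))
    (st : List String × Bool) (p : String × List (String × String)) :
    pvRoundF nodes st p = st ∨
    ∃ par, p.1 ∈ st.1 ∧ pvStep nodes p.1 par ∧ par ∉ st.1 ∧
      pvRoundF nodes st p = (PySem.Set.add st.1 par, true) := by
  by_cases hc : st.1.contains p.1 = true
  · cases hpar : ((nodes.lookup p.1).getD []).lookup "parent" with
    | none =>
      have he : pvRoundF nodes st p = st := by
        simp only [pvRoundF, if_pos hc, hpar]
      exact Or.inl he
    | some par =>
      by_cases hg : (par ≠ "" && (nodes.lookup par).isSome && !st.1.contains par) = true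
      · have he : pvRoundF nodes st p = (PySem.Set.add st.1 par, true) := by
          simp only [pvRoundF, if_pos hc, hpar]
          rw [if_pos hg]
        have hg' : par ≠ "" ∧ (nodes.lookup par).isSome = true ∧ par ∉ st.1 := by
          simpa [List.contains_eq_mem, -ne_eq, and_assoc] using hg
        exact Or.inr ⟨par, by simpa [List.contains_eq_mem] using hc,
          ⟨hpar, hg'.2.1, hg'.1⟩, hg'.2.2, he⟩
      · have he : pvRoundF nodes st p = st := by
          simp only [pvRoundF, if_pos hc, hpar]
          rw [if_neg hg]
        exact Or.inl he
  · exact Or.inl (by simp only [pvRoundF, if_neg hc])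

-- the changed flag never falls back to False
theorem pvFoldB_flag (nodes : List (String × List (String × String))) :
    ∀ (l : List (String × List (String × String))) (st : List String × Bool),
    st.2 = true → (l.foldl (pvRoundF nodes) st).2 = true := by
  intro l
  induction l with
  | nil => intro st h; simpa using h
  | cons p l ih =>
    intro st h
    rw [List.foldl_cons]
    rcases pvRoundF_cases nodes st p with he | ⟨par, _, _, _, he⟩
    · rw [he]; exact ih st h
    · rw [he]; exact ih _ rfl

-- the included set only grows during a pass
theorem pvFoldB_grow (nodes : List (String × List (String × String))) :
    ∀ (l : List (String × List (String × String))) (st : List String × Bool) (z : String),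
    z ∈ st.1 → z ∈ (l.foldl (pvRoundF nodes) st).1 := by
  intro l
  induction l with
  | nil => intro st z h; simpa using h
  | cons p l ih =>
    intro st z h
    rw [List.foldl_cons]
    rcases pvRoundF_cases nodes st p with he | ⟨par, _, _, _, he⟩
    · rw [he]; exact ih st z h
    · rw [he]; exact ih _ z ((PySem.Set.mem_add ..).mpr (Or.inl h))

-- a pass only adds step-successors of already-included nodes (soundness for any step-closed Q)
theorem pvFoldB_sound (nodes : List (String × List (String × String))) (Q : String → Prop)
    (hQ : ∀ z v, Q z → pvStep nodes z v → Q v) :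
    ∀ (l : List (String × List (String × String))) (st : List String × Bool),
    (∀ z ∈ st.1, Q z) → ∀ z ∈ (l.foldl (pvRoundF nodes) st).1, Q z := by
  intro l
  induction l with
  | nil => intro st h; simpa using h
  | cons p l ih =>
    intro st h
    rw [List.foldl_cons]
    rcases pvRoundF_cases nodes st p with he | ⟨par, hp1, hs, _, he⟩
    · rw [he]; exact ih st h
    · rw [he]
      apply ih
      intro z hz
      rcases (PySem.Set.mem_add ..).mp hz with h1 | rfl
      · exact h z h1
      · exact hQ p.1 z (h p.1 hp1) hs

-- a pass that reports no change left the set alone, and that set is step-closed at the scanned keys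
theorem pvFoldB_false (nodes : List (String × List (String × String))) :
    ∀ (l : List (String × List (String × String))) (I : List String),
    (l.foldl (pvRoundF nodes) (I, false)).2 = false →
    (l.foldl (pvRoundF nodes) (I, false)).1 = I ∧
    (∀ p ∈ l, p.1 ∈ I → ∀ v, pvStep nodes p.1 v → v ∈ I) := by
  intro l
  induction l with
  | nil => intro I _; simp
  | cons p l ih =>
    intro I hfin
    rw [List.foldl_cons] at hfin ⊢
    rcases pvRoundF_cases nodes (I, false) p with he | ⟨par, _, _, _, he⟩
    · rw [he] at hfin ⊢
      obtain ⟨heq, hcl⟩ := ih I hfin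
      refine ⟨heq, ?_⟩
      intro q hq hq1 v hs
      rcases List.mem_cons.mp hq with rfl | hq'
      · -- head entry: if v were new, this step would have added it and raised the flag
        by_contra hv
        have hcomp : pvRoundF nodes (I, false) q = (PySem.Set.add I v, true) := by
          simp only [pvRoundF, if_pos (show (I.contains q.1 : Bool) = true by
            simpa [List.contains_eq_mem] using hq1), hs.1]
          rw [if_pos (by simp [List.contains_eq_mem, hs.2.2, hs.2.1, hv])]
        rw [he] at hcomp
        have : (false : Bool) = true := congrArg Prod.snd hcomp
        exact Bool.false_ne_true this
      · exact hcl q hq' hq1 v hs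
    · rw [he] at hfin
      have := pvFoldB_flag nodes l _ (by rfl : ((PySem.Set.add I par, true) : List String × Bool).2 = true)
      rw [hfin] at this
      exact absurd this (by simp)

-- a pass that reports a change added at least one new key
theorem pvFoldB_change (nodes : List (String × List (String × String))) :
    ∀ (l : List (String × List (String × String))) (I : List String),
    (l.foldl (pvRoundF nodes) (I, false)).2 = true →
    ∃ par, par ∉ I ∧ par ∈ nodes.map Prod.fst ∧
      ∀ z ∈ PySem.Set.add I par, z ∈ (l.foldl (pvRoundF nodes) (I, false)).1 := by
  intro l
  induction l with
  | nil => intro I h; simp at h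
  | cons p l ih =>
    intro I hfin
    rw [List.foldl_cons] at hfin ⊢
    rcases pvRoundF_cases nodes (I, false) p with he | ⟨par, _, hs, hnew, he⟩
    · rw [he] at hfin ⊢
      exact ih I hfin
    · rw [he]
      refine ⟨par, hnew, pvLookup_isSome_mem hs.2.1, ?_⟩
      intro z hz
      exact pvFoldB_grow nodes l _ z hz

-- the fixpoint loop: soundness needs no fuel bound
theorem pvFix_sound (nodes : List (String × List (String × String))) (Q : String → Prop)
    (hQ : ∀ z v, Q z → pvStep nodes z v → Q v) :
    ∀ (fuel : Nat) (I : List String), (∀ z ∈ I, Q z) → ∀ z ∈ pvFix nodes fuel I, Q z := by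
  intro fuel
  induction fuel with
  | zero => intro I h; simpa [pvFix] using h
  | succ fuel ih =>
    intro I h
    simp only [pvFix]
    have hsnd : ∀ z ∈ (pvRound nodes I).1, Q z := pvFoldB_sound nodes Q hQ nodes (I, false) h
    split
    · exact ih _ hsnd
    · exact hsnd

theorem pvFix_grow (nodes : List (String × List (String × String))) :
    ∀ (fuel : Nat) (I : List String) (z : String), z ∈ I → z ∈ pvFix nodes fuel I := by
  intro fuel
  induction fuel with
  | zero => intro I z h; simpa [pvFix] using h
  | succ fuel ih =>
    intro I z h
    simp only [pvFix]
    have hg : z ∈ (pvRound nodes I).1 := pvFoldB_grow nodes nodes (I, false) z h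
    split
    · exact ih _ z hg
    · exact hg

-- with fuel > pvNewK the loop reaches a stable pass, so the result is step-closed
theorem pvFix_closed (nodes : List (String × List (String × String))) :
    ∀ (fuel : Nat) (I : List String), pvNewK nodes I < fuel →
    ∀ u ∈ pvFix nodes fuel I, ∀ v, pvStep nodes u v → v ∈ pvFix nodes fuel I := by
  intro fuel
  induction fuel with
  | zero => intro I h; omega
  | succ fuel ih =>
    intro I hfuel
    simp only [pvFix, pvRound]
    cases hflag : (List.foldl (pvRoundF nodes) (I, false) nodes).2 with
    | false =>
      simp only [Bool.false_eq_true, if_false]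
      obtain ⟨heq, hcl⟩ := pvFoldB_false nodes nodes I hflag
      rw [heq]
      intro u hu v hs
      obtain ⟨p, hp, hp1⟩ := List.mem_map.mp (pvStep_mem hs)
      exact hcl p hp (hp1 ▸ hu) v (hp1 ▸ hs)
    | true =>
      simp only [if_true]
      obtain ⟨par, hnew, hkey, hsub⟩ := pvFoldB_change nodes nodes I hflag
      have h1 : pvNewK nodes (List.foldl (pvRoundF nodes) (I, false) nodes).1 ≤ pvNewK nodes (PySem.Set.add I par) :=
        pvNewK_mono nodes hsub
      have h2 : pvNewK nodes (PySem.Set.add I par) < pvNewK nodes I :=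
        pvNewK_add_lt nodes hkey hnew
      exact ih _ (by omega)

-- ---------- shared string lemmas ----------

-- lower s = "" only for s = ""
theorem pvLower_ne_empty {s : String} (h : s ≠ "") : PySem.Str.lower s ≠ "" := by
  intro he
  apply h
  have h2 : (PySem.Str.lower s).toList = [] := by rw [he]; rfl
  rw [PySem.Str.toList_lower] at h2
  unfold PySem.Chars.lower at h2
  have h3 : s.toList = [] := by simpa using h2
  exact String.toList_eq_nil_iff.mp h3

-- a non-empty needle is not in the empty string
theorem pvIsIn_empty {q : String} (h : q ≠ "") : PySem.Str.isIn q "" = false := by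
  rw [PySem.Str.isIn_eq, PySem.Chars.isIn_eq_false_iff]
  intro hinf
  have h2 : List.Sublist q.toList ([] : List Char) := by simpa using hinf.sublist
  exact h (String.toList_eq_nil_iff.mp (List.sublist_nil.mp h2))

-- membership of the matches list
theorem pvMatches_mem (q : String) (nodes : List (String × List (String × String))) (z : String) :
    z ∈ pvMatches q nodes ↔ ∃ p ∈ nodes, pvTest q p ∧ p.1 = z := by
  simp only [pvMatches, List.mem_map, List.mem_filter, pvTest]
  constructor
  · rintro ⟨p, ⟨hp, ht⟩, rfl⟩
    exact ⟨p, hp, ht, rfl⟩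
  · rintro ⟨p, hp, ht, rfl⟩
    exact ⟨p, ⟨hp, ht⟩, rfl⟩

-- the two included sets have the same members, hence the same filter
theorem pvMain (nodes : List (String × List (String × String))) (query : String)
    (hq : query ≠ "")
    (hne : ∀ p ∈ nodes, p.1 = "" →
      PySem.Str.isIn (PySem.Str.lower query) (PySem.Str.lower ((p.2.lookup "prompt").getD "")) = false) :
    build_filtered_nodes_py nodes query = build_filtered_nodes_py_alt nodes query := by
  simp only [build_filtered_nodes_py, build_filtered_nodes_py_alt, if_neg hq]
  set ql := PySem.Str.lower query with hql
  have hqlne : ql ≠ "" := pvLower_ne_empty hq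
  have hneT : ∀ p ∈ nodes, pvTest ql p → p.1 ≠ "" := by
    intro p hp hT hp1
    unfold pvTest at hT
    rw [hp1] at hT
    rw [show PySem.Str.lower "" = "" from rfl, pvIsIn_empty hqlne, hne p hp hp1] at hT
    simp at hT
  obtain ⟨hmemA, _⟩ := pvFoldA_spec nodes ql nodes [] hneT (by simp)
  set Q : String → Prop := fun z => ∃ p ∈ nodes, pvTest ql p ∧ pvReach nodes p.1 z with hQdef
  have hQ : ∀ z v, Q z → pvStep nodes z v → Q v := by
    rintro z v ⟨p, hp, hT, hR⟩ hs
    exact ⟨p, hp, hT, hR.tail hs⟩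
  set ms := pvMatches ql nodes with hms
  have hofml : ∀ z, z ∈ PySem.Set.ofList ms ↔ z ∈ ms := fun z => PySem.Set.mem_ofList ..
  have hfuel : pvNewK nodes (PySem.Set.ofList ms) < nodes.length + 1 := by
    have := pvNewK_le nodes (PySem.Set.ofList ms); omega
  have hS : ∀ z ∈ pvFix nodes (nodes.length + 1) (PySem.Set.ofList ms), Q z := by
    apply pvFix_sound nodes Q hQ
    intro z hz
    obtain ⟨p, hp, hT, rfl⟩ := (pvMatches_mem ql nodes z).mp ((hofml z).mp hz)
    exact ⟨p, hp, hT, Relation.ReflTransGen.refl⟩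
  have hG : ∀ z ∈ PySem.Set.ofList ms, z ∈ pvFix nodes (nodes.length + 1) (PySem.Set.ofList ms) :=
    fun z hz => pvFix_grow nodes _ _ z hz
  have hC := pvFix_closed nodes (nodes.length + 1) (PySem.Set.ofList ms) hfuel
  have hiff : ∀ y, (y ∈ nodes.foldl (fun inc p =>
        if PySem.Str.isIn ql (PySem.Str.lower p.1)
           || PySem.Str.isIn ql (PySem.Str.lower ((p.2.lookup "prompt").getD "")) then
          pvWalkA nodes (2 * nodes.length + 3) p.1 inc
        else inc) []) ↔
      y ∈ pvFix nodes (nodes.length + 1) (PySem.Set.ofList ms) := by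
    intro y
    rw [hmemA y]
    constructor
    · rintro (h | ⟨p, hp, hT, hR⟩)
      · simp at h
      · have hpm : p.1 ∈ PySem.Set.ofList ms :=
          (hofml p.1).mpr ((pvMatches_mem ql nodes p.1).mpr ⟨p, hp, hT, rfl⟩)
        exact pvClosed_reach hC (hG p.1 hpm) hR
    · intro h
      exact Or.inr (hS y h)
  have hfilter : nodes.filter (fun p => (nodes.foldl (fun inc p =>
        if PySem.Str.isIn ql (PySem.Str.lower p.1)
           || PySem.Str.isIn ql (PySem.Str.lower ((p.2.lookup "prompt").getD "")) then
          pvWalkA nodes (2 * nodes.length + 3) p.1 inc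
        else inc) []).contains p.1) = nodes.filter (fun p =>
        (pvFix nodes (nodes.length + 1) (PySem.Set.ofList ms)).contains p.1) := by
    apply List.filter_congr
    intro p _
    simp only [List.contains_eq_mem]
    exact decide_eq_decide.mpr (hiff p.1)
  rw [hfilter]

-- ===== VERDICT (by name: the statement is the Claim_ definition above) =====
theorem build_filtered_nodes_py_spec : Claim_unchanged_build_filtered_nodes_py := by
  intro nodes query _ hnd
  by_cases hq : query = ""
  · simp [build_filtered_nodes_py, build_filtered_nodes_py_alt, hq]
  · apply pvMain nodes query hq
    intro p hp hp1
    cases hval : PySem.Str.isIn (PySem.Str.lower query) (PySem.Str.lower ((p.2.lookup "prompt").getD "")) with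
    | false => rfl
    | true =>
      refine absurd ?_ hnd
      unfold D_build_filtered_nodes_py
      exact ⟨hq, p, hp, hp1, hval⟩

theorem build_filtered_nodes_py_changed : Claim_changed_build_filtered_nodes_py := by
  unfold Claim_changed_build_filtered_nodes_py; decide

theorem build_filtered_nodes_py_tight : Claim_exact_build_filtered_nodes_py := by
  intro nodes query _ hd heq
  obtain ⟨hq, p0, hp0, hfst, hprompt⟩ := hd
  simp only [build_filtered_nodes_py, build_filtered_nodes_py_alt, if_neg hq] at heq
  set ql := PySem.Str.lower query with hql
  set inclA := nodes.foldl (fun inc p =>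
        if PySem.Str.isIn ql (PySem.Str.lower p.1)
           || PySem.Str.isIn ql (PySem.Str.lower ((p.2.lookup "prompt").getD "")) then
          pvWalkA nodes (2 * nodes.length + 3) p.1 inc
        else inc) [] with hinclA
  set ms := pvMatches ql nodes with hms
  set inclB := pvFix nodes (nodes.length + 1) (PySem.Set.ofList ms) with hinclB
  -- "" is never in A's included set
  have hnoA : "" ∉ inclA := pvFoldA_no_empty nodes ql nodes [] (by simp)
  -- "" is in B's included set
  have hT0 : pvTest ql p0 := by
    unfold pvTest
    rw [hprompt]
    simp
  have hmsmem : ("" : String) ∈ ms :=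
    (pvMatches_mem ql nodes "").mpr ⟨p0, hp0, hT0, hfst⟩
  have hnoB : ("" : String) ∈ inclB :=
    pvFix_grow nodes _ _ "" ((PySem.Set.mem_ofList ..).mpr hmsmem)
  -- p0 (with key "") survives B's final filter, so B's output has an entry with key ""
  have hBout : ("" , ((nodes.lookup "").getD [] : List (String × String))) ∈
      (nodes.filter (fun p => inclB.contains p.1)).map (fun p => (p.1, (nodes.lookup p.1).getD [])) := by
    apply List.mem_map.mpr
    refine ⟨p0, List.mem_filter.mpr ⟨hp0, ?_⟩, by rw [hfst]⟩
    rw [hfst]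
    simp [List.contains_eq_mem, hnoB]
  rw [← heq] at hBout
  obtain ⟨p, hpf, _⟩ := List.mem_map.mp hBout
  have hpmem := List.mem_filter.mp hpf
  have : p.1 ∈ inclA := by simpa [List.contains_eq_mem] using hpmem.2
  have hkey : p.1 = "" := by
    have := congrArg Prod.fst ‹(p.1, (nodes.lookup p.1).getD []) = ("", (nodes.lookup "").getD [])›
    simpa using this
  rw [hkey] at this
  exact hnoA this
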